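-- pv_equiv track=rewrite | github.com/olabknbit/evidence-quality-estimation | ebm/parse_reference.py | generate_all_variations_of_word
-- ===== SOURCE A (Python) =====
-- from typing import List, Optional, Set, Tuple
--
-- def generate_all_variations_of_word(word: str, words: Set[str]) -> Set[str]:
--     words.add(word)
--     for i in range(len(word)):
--         if word[i].isupper():
--             new_word = list(word)
--             new_word[i] = new_word[i].lower()
--             new_word = ''.join(new_word)
--             words.update(generate_all_variations_of_word(new_word, words))
--     return words
-- ===== SOURCE B (Python) =====
-- def generate_all_variations_of_word(word, words):
--     # Visits each subset of uppercase positions exactly once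
--     # instead of A's redundant re-recursion; mutates `words` like A does.
--     words.add(word)
--     chars = list(word)
--     ups = [i for i in range(len(word)) if chars[i].isupper()]
--
--     def go(j):
--         words.add(''.join(chars))
--         for t in range(j, len(ups)):
--             i = ups[t]
--             orig = chars[i]
--             chars[i] = orig.lower()
--             go(t + 1)
--             chars[i] = orig
--
--     go(0)
--     return words
-- ===== Notes on version B (the rewrite author's own statement) =====
-- stated objective: alternative
-- what changed: A re-recurses on every uppercase position at every level (revisiting each case variation along many redundant paths and relying on the set for dedup); B collects the uppercase positions once and enumerates each subset of them exactly once by index recursion, adding each variation a single time.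
import Mathlib
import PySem

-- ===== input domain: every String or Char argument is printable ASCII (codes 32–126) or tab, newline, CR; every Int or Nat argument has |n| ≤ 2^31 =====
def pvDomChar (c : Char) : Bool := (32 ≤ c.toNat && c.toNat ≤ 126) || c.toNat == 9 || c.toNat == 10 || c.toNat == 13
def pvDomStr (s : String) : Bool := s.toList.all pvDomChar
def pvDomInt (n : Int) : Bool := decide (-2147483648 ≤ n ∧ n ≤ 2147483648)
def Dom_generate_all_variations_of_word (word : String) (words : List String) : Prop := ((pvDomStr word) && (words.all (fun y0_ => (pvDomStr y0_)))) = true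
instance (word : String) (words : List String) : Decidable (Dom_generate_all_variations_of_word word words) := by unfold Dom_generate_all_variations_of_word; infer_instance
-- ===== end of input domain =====

-- B replaces A's redundant re-recursion over every uppercase position (which revisits each
-- case variation many times and relies on the set for dedup) by a single enumeration that
-- visits each subset of uppercase positions exactly once.  Both A and B mutate the Python
-- set `words` in place exactly alike; the equivalence proved here is about the return value.

-- shared one-step primitive: word with position i lowercased (list assignment; i always in
-- range at every call site, ported with getD)
def pvLowerAt (c : List Char) (i : Nat) : List Char :=
  c.set i (PySem.Chars.lowerChar (c.getD i ' '))

-- number of uppercase characters (termination measure for A's recursion)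
def pvUpCount (c : List Char) : Nat := c.countP (fun ch => PySem.Chars.isupper ch)

-- lowering an uppercase ASCII character yields a non-uppercase one
theorem pvIsupper_lowerChar (c : Char) (h : PySem.Chars.isupper c = true) :
    PySem.Chars.isupper (PySem.Chars.lowerChar c) = false := by
  rw [PySem.Chars.lowerChar, if_pos h]
  simp only [PySem.Chars.isupper, Char.le_def, decide_eq_true_eq, Bool.and_eq_true] at h
  have h1 : 65 ≤ c.val.toNat := by
    have := UInt32.le_iff_toNat_le.mp h.1
    simpa using this
  have h2 : c.val.toNat ≤ 90 := by
    have := UInt32.le_iff_toNat_le.mp h.2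
    simpa using this
  have hct : c.toNat = c.val.toNat := rfl
  have hval : (Char.ofNat (c.toNat + 32)).toNat = c.toNat + 32 := by
    rw [Char.toNat_ofNat, if_pos (Or.inl (by omega))]
  simp only [PySem.Chars.isupper, Char.le_def, Bool.and_eq_false_iff, decide_eq_false_iff_not]
  right
  intro hle
  have hle' := UInt32.le_iff_toNat_le.mp hle
  have hz : ('Z').val.toNat = 90 := by decide
  have hv' : (Char.ofNat (c.toNat + 32)).val.toNat = c.toNat + 32 := hval
  omega

-- lowering an uppercase character strictly decreases the uppercase count
-- (cited by the ports' termination proofs, hence above them)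
theorem pvUpCount_lowerAt_lt (c : List Char) (i : Nat) (hi : i < c.length)
    (hu : PySem.Chars.isupper (c.getD i ' ') = true) :
    pvUpCount (pvLowerAt c i) < pvUpCount c := by
  induction c generalizing i with
  | nil => simp at hi
  | cons x t ihc =>
    cases i with
    | zero =>
      unfold pvLowerAt
      have hg : (x :: t).getD 0 ' ' = x := rfl
      rw [hg] at hu ⊢
      show pvUpCount (PySem.Chars.lowerChar x :: t) < pvUpCount (x :: t)
      unfold pvUpCount
      rw [List.countP_cons, List.countP_cons, pvIsupper_lowerChar _ hu, hu]
      simp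
    | succ n =>
      unfold pvLowerAt
      have hg : (x :: t).getD (n + 1) ' ' = t.getD n ' ' := rfl
      rw [hg] at hu ⊢
      show pvUpCount (x :: t.set n (PySem.Chars.lowerChar (t.getD n ' '))) < pvUpCount (x :: t)
      unfold pvUpCount
      rw [List.countP_cons, List.countP_cons]
      have := ihc n (by simpa using hi) hu
      unfold pvUpCount pvLowerAt at this
      omega

-- ===== PORT A =====
-- the body of A after the initial `words.add(word)`: the `for i in range(len(word))` loop,
-- i the loop index; the recursive call re-enters at index 0 after adding the new word
def generate_all_variations_of_word_core (c : List Char) (i : Nat) (words : List String) :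
    List String :=
  if h : i < c.length then
    if hu : PySem.Chars.isupper (c.getD i ' ') = true then
      let nc := c.set i (PySem.Chars.lowerChar (c.getD i ' '))
      -- recursive call generate_all_variations_of_word(new_word, words)
      let r := generate_all_variations_of_word_core nc 0 (PySem.Set.add words (String.ofList nc))
      -- words.update(result), then next loop iteration
      generate_all_variations_of_word_core c (i + 1) (PySem.Set.update words r)
    else
      generate_all_variations_of_word_core c (i + 1) words
  else words
termination_by (pvUpCount c, c.length - i)
decreasing_by
  · exact Prod.Lex.left _ _ (pvUpCount_lowerAt_lt c i h hu)
  · exact Prod.Lex.right _ (by omega)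
  · exact Prod.Lex.right _ (by omega)

def generate_all_variations_of_word (word : String) (words : List String) : List String :=
  generate_all_variations_of_word_core word.toList 0 (PySem.Set.add words word)

-- ===== PORT B =====
-- B's inner loop `for t in range(j, len(ups))`: rest = ups[j:]; each iteration lowers
-- position i = ups[t] and re-enters go(t+1) (which first adds the current string)
def generate_all_variations_of_word_go (chars : List Char) (rest : List Nat)
    (words : List String) : List String :=
  match rest with
  | [] => words
  | i :: rs =>
    let nchars := chars.set i (PySem.Chars.lowerChar (chars.getD i ' '))
    generate_all_variations_of_word_go chars rs
      (generate_all_variations_of_word_go nchars rs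
        (PySem.Set.add words (String.ofList nchars)))

def generate_all_variations_of_word_alt (word : String) (words : List String) : List String :=
  let chars := word.toList
  let ups := (List.range chars.length).filter (fun i => PySem.Chars.isupper (chars.getD i ' '))
  let words := PySem.Set.add words word
  -- go(0): words.add(''.join(chars)) then the loop over all of ups
  generate_all_variations_of_word_go chars ups (PySem.Set.add words (String.ofList chars))

-- ===== PRECONDITION & SPEC =====
def Spec_generate_all_variations_of_word (word : String) (words : List String) (out : List String) : Prop := out = generate_all_variations_of_word_alt word words
instance (word : String) (words : List String) (out : List String) : Decidable (Spec_generate_all_variations_of_word word words out) := by unfold Spec_generate_all_variations_of_word; infer_instance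

-- ===== CLAIM (what is proved, stated in full; the proofs are below) =====
def Claim_equal_generate_all_variations_of_word : Prop := ∀ (word : String) (words : List String), Dom_generate_all_variations_of_word word words → Spec_generate_all_variations_of_word word words (generate_all_variations_of_word word words)

-- ===== LEMMAS AND PROOFS =====

-- the ascending list of uppercase positions of c (what B computes as `ups`)
def pvUps (c : List Char) : List Nat :=
  (List.range c.length).filter (fun j => PySem.Chars.isupper (c.getD j ' '))

-- B's add-sequence: pvAux c rest = the strings go adds in its loop over rest,
-- pvGseq c rest = the strings go(j) adds (c first)
def pvAux (c : List Char) (rest : List Nat) : List (List Char) :=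
  match rest with
  | [] => []
  | i :: rs => (pvLowerAt c i :: pvAux (pvLowerAt c i) rs) ++ pvAux c rs

def pvGseq (c : List Char) (rest : List Nat) : List (List Char) := c :: pvAux c rest

-- A's add-sequence: preorder of A's redundant recursion tree (with repetitions)
def pvFseq (c : List Char) : List (List Char) :=
  c :: (pvUps c).attach.flatMap (fun j => pvFseq (pvLowerAt c j.1))
termination_by pvUpCount c
decreasing_by
  have hj := j.2
  simp only [pvUps, List.mem_filter, List.mem_range] at hj
  exact pvUpCount_lowerAt_lt c j.1 hj.1 hj.2

theorem pvFseq_eq (c : List Char) :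
    pvFseq c = c :: (pvUps c).flatMap (fun j => pvFseq (pvLowerAt c j)) := by
  rw [pvFseq]
  congr 1
  simp [List.flatMap]

-- folding PySem.Set.add of the String forms of a list of char-lists
def pvChain (st : List String) (l : List (List Char)) : List String :=
  l.foldl (fun s x => PySem.Set.add s (String.ofList x)) st

-- iterated lowering along a list of positions
def pvLowAll (S : List Nat) (c : List Char) : List Char := S.foldl pvLowerAt c

-- ---- fold/set facts ----

theorem pvChain_append (st : List String) (l₁ l₂ : List (List Char)) :
    pvChain st (l₁ ++ l₂) = pvChain (pvChain st l₁) l₂ := List.foldl_append ..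

theorem pvChain_cons (st : List String) (x : List Char) (l : List (List Char)) :
    pvChain st (x :: l) = pvChain (PySem.Set.add st (String.ofList x)) l := rfl

theorem mem_pvChain_left {y : String} {st : List String} (l : List (List Char))
    (h : y ∈ st) : y ∈ pvChain st l := by
  induction l generalizing st with
  | nil => exact h
  | cons x l ih => exact ih ((PySem.Set.mem_add _ _ _).mpr (Or.inl h))

theorem mem_pvChain_of_mem {x : List Char} {l : List (List Char)} (st : List String)
    (h : x ∈ l) : String.ofList x ∈ pvChain st l := by
  induction l generalizing st with
  | nil => cases h
  | cons z l ih =>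
    rcases List.mem_cons.mp h with rfl | hx
    · exact mem_pvChain_left l ((PySem.Set.mem_add _ _ _).mpr (Or.inr rfl))
    · exact ih _ hx

theorem pvChain_absorb {l : List (List Char)} {st : List String}
    (h : ∀ x ∈ l, String.ofList x ∈ st) : pvChain st l = st := by
  induction l with
  | nil => rfl
  | cons x l ih =>
    rw [pvChain_cons, PySem.Set.add_of_mem (h x (List.mem_cons_self ..))]
    exact ih fun z hz => h z (List.mem_cons_of_mem _ hz)

theorem pvFoldlAdd_absorb {l st : List String} (h : ∀ y ∈ l, y ∈ st) :
    l.foldl PySem.Set.add st = st := by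
  induction l with
  | nil => rfl
  | cons x l ih =>
    simp only [List.foldl_cons, PySem.Set.add_of_mem (h x (List.mem_cons_self ..))]
    exact ih fun z hz => h z (List.mem_cons_of_mem _ hz)

theorem pvFoldlAdd_disjoint {Δ s : List String} (hnd : Δ.Nodup) (hdis : ∀ y ∈ Δ, y ∉ s) :
    Δ.foldl PySem.Set.add s = s ++ Δ := by
  induction Δ generalizing s with
  | nil => simp
  | cons x Δ ih =>
    simp only [List.foldl_cons]
    rw [PySem.Set.add_of_not_mem (hdis x (List.mem_cons_self ..))]
    rw [ih hnd.of_cons]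
    · simp
    · intro y hy
      simp only [List.mem_append, List.mem_singleton]
      rintro (hs | rfl)
      · exact hdis y (List.mem_cons_of_mem _ hy) hs
      · exact (List.nodup_cons.mp hnd).1 hy

theorem pvChain_delta (l : List (List Char)) (st : List String) :
    ∃ Δ, pvChain st l = st ++ Δ ∧ Δ.Nodup ∧ ∀ y ∈ Δ, y ∉ st := by
  induction l generalizing st with
  | nil => exact ⟨[], by simp [pvChain], List.nodup_nil, by simp⟩
  | cons x l ih =>
    rw [pvChain_cons]
    by_cases hx : String.ofList x ∈ st
    · rw [PySem.Set.add_of_mem hx]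
      exact ih st
    · rw [PySem.Set.add_of_not_mem hx]
      obtain ⟨Δ, heq, hnd, hdis⟩ := ih (st ++ [String.ofList x])
      refine ⟨String.ofList x :: Δ, by simpa using heq, ?_, ?_⟩
      · refine List.nodup_cons.mpr ⟨fun hmem => ?_, hnd⟩
        exact hdis _ hmem (by simp)
      · intro y hy
        rcases List.mem_cons.mp hy with rfl | hy'
        · exact hx
        · intro hys
          exact hdis y hy' (by simp [hys])

-- Set.update of a state with a chain grown from it is that chain (A's `words.update(r)`)
theorem pvUpdate_chain (s : List String) (y : String) (X : List (List Char)) :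
    PySem.Set.update s (pvChain (PySem.Set.add s y) X) = pvChain (PySem.Set.add s y) X := by
  have hbase : ∃ Δ₀ : List String, PySem.Set.add s y = s ++ Δ₀ ∧ Δ₀.Nodup ∧ ∀ z ∈ Δ₀, z ∉ s := by
    by_cases hy : y ∈ s
    · exact ⟨[], by simp [PySem.Set.add_of_mem hy], List.nodup_nil, by simp⟩
    · exact ⟨[y], PySem.Set.add_of_not_mem hy, List.nodup_singleton y,
        by simpa using hy⟩
  obtain ⟨Δ₀, h₀, hnd₀, hdis₀⟩ := hbase
  obtain ⟨Δ₁, h₁, hnd₁, hdis₁⟩ := pvChain_delta X (PySem.Set.add s y)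
  have hr : pvChain (PySem.Set.add s y) X = s ++ (Δ₀ ++ Δ₁) := by
    rw [h₁, h₀, List.append_assoc]
  rw [hr]
  have hndΔ : (Δ₀ ++ Δ₁).Nodup := by
    refine List.nodup_append.mpr ⟨hnd₀, hnd₁, ?_⟩
    intro a ha b hb heq
    subst heq
    exact hdis₁ a hb (by rw [h₀]; exact List.mem_append_right _ ha)
  have hdisΔ : ∀ z ∈ Δ₀ ++ Δ₁, z ∉ s := by
    intro z hz
    rcases List.mem_append.mp hz with hz | hz
    · exact hdis₀ z hz
    · intro hzs
      exact hdis₁ z hz (by rw [h₀]; exact List.mem_append_left _ hzs)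
  show (s ++ (Δ₀ ++ Δ₁)).foldl PySem.Set.add s = s ++ (Δ₀ ++ Δ₁)
  rw [List.foldl_append, pvFoldlAdd_absorb (fun y hy => hy)]
  exact pvFoldlAdd_disjoint hndΔ hdisΔ

-- ---- position facts ----

theorem pvLowerAt_comm (c : List Char) (i j : Nat) :
    pvLowerAt (pvLowerAt c i) j = pvLowerAt (pvLowerAt c j) i := by
  by_cases hij : i = j
  · subst hij; rfl
  · unfold pvLowerAt
    have hgi : (c.set j (PySem.Chars.lowerChar (c.getD j ' '))).getD i ' ' = c.getD i ' ' := by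
      simp [List.getD, List.getElem?_set_ne (by omega : j ≠ i)]
    have hgj : (c.set i (PySem.Chars.lowerChar (c.getD i ' '))).getD j ' ' = c.getD j ' ' := by
      simp [List.getD, List.getElem?_set_ne (by omega : i ≠ j)]
    rw [hgi, hgj, List.set_comm _ _ hij]

theorem mem_pvUps {c : List Char} {j : Nat} :
    j ∈ pvUps c ↔ j < c.length ∧ PySem.Chars.isupper (c.getD j ' ') = true := by
  simp [pvUps, List.mem_filter, List.mem_range]

theorem pvUps_nodup (c : List Char) : (pvUps c).Nodup :=
  List.Nodup.filter _ (List.nodup_range)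

theorem pvUps_lowerAt (c : List Char) (j : Nat) (hj : j ∈ pvUps c) :
    pvUps (pvLowerAt c j) = (pvUps c).erase j := by
  obtain ⟨hlt, hup⟩ := mem_pvUps.mp hj
  rw [List.Nodup.erase_eq_filter (pvUps_nodup c) j]
  unfold pvUps pvLowerAt
  rw [List.filter_filter, List.length_set]
  apply List.filter_congr
  intro k hk
  have hkn := List.mem_range.mp hk
  by_cases hkj : k = j
  · subst hkj
    have : (c.set k (PySem.Chars.lowerChar (c.getD k ' '))).getD k ' '
        = PySem.Chars.lowerChar (c.getD k ' ') := by
      simp [List.getD, List.getElem?_set_self hlt]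
    rw [this, pvIsupper_lowerChar _ hup]
    simp
  · have : (c.set j (PySem.Chars.lowerChar (c.getD j ' '))).getD k ' ' = c.getD k ' ' := by
      simp [List.getD, List.getElem?_set_ne (by omega : j ≠ k)]
    rw [this]
    simp [hkj]

-- ---- pvLowAll / membership characterisation of B's sequence ----

theorem pvLowAll_middle (T₁ T₂ : List Nat) (j : Nat) (c : List Char) :
    pvLowAll (T₁ ++ j :: T₂) c = pvLowAll (T₁ ++ T₂) (pvLowerAt c j) := by
  induction T₁ generalizing c with
  | nil => rfl
  | cons t T₁ ih =>
    show pvLowAll (T₁ ++ j :: T₂) (pvLowerAt c t) = pvLowAll (T₁ ++ T₂) (pvLowerAt (pvLowerAt c j) t)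
    rw [ih, pvLowerAt_comm]

theorem mem_pvGseq {x c : List Char} {rest : List Nat} :
    x ∈ pvGseq c rest ↔ ∃ S, S.Sublist rest ∧ x = pvLowAll S c := by
  induction rest generalizing c with
  | nil =>
    simp only [pvGseq, pvAux, List.mem_singleton, List.sublist_nil]
    constructor
    · rintro rfl; exact ⟨[], rfl, rfl⟩
    · rintro ⟨S, rfl, rfl⟩; rfl
  | cons i rs ih =>
    constructor
    · intro hx
      rcases List.mem_cons.mp hx with rfl | hx
      · exact ⟨[], List.nil_sublist _, rfl⟩
      · have hx' : x ∈ (pvLowerAt c i :: pvAux (pvLowerAt c i) rs) ++ pvAux c rs := hx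
        rcases List.mem_append.mp hx' with hx | hx
        · obtain ⟨S, hS, rfl⟩ := ih.mp hx
          exact ⟨i :: S, List.cons_sublist_cons.mpr hS, rfl⟩
        · obtain ⟨S, hS, rfl⟩ := ih.mp (List.mem_cons_of_mem _ hx)
          exact ⟨S, hS.trans (List.sublist_cons_self i rs), rfl⟩
    · rintro ⟨S, hS, rfl⟩
      rcases List.sublist_cons_iff.mp hS with hS' | ⟨S', rfl, hS'⟩
      · have hx := ih.mpr ⟨S, hS', rfl⟩
        rcases List.mem_cons.mp hx with h | h
        · rw [h]; exact List.mem_cons_self ..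
        · exact List.mem_cons_of_mem _ (List.mem_append_right _ h)
      · have hx := ih.mpr ⟨S', hS', rfl⟩
        exact List.mem_cons_of_mem _ (List.mem_append_left _ hx)

-- ---- the combinatorial core ----

-- branches of positions already covered by the state may be dropped
theorem pvDropPre (pre : List Nat) (suf : List Nat) (c : List Char) (st : List String)
    (H : ∀ pre₁ p pre₂, pre = pre₁ ++ p :: pre₂ →
      ∀ x ∈ pvGseq (pvLowerAt c p) (pre₂ ++ suf), String.ofList x ∈ st) :
    pvChain st (pvGseq c (pre ++ suf)) = pvChain st (pvGseq c suf) := by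
  induction pre with
  | nil => rfl
  | cons p pre' ih =>
    have hstep : pvGseq c ((p :: pre') ++ suf)
        = c :: (pvGseq (pvLowerAt c p) (pre' ++ suf) ++ pvAux c (pre' ++ suf)) := rfl
    rw [hstep, pvChain_cons, pvChain_append]
    rw [pvChain_absorb (fun x hx => (PySem.Set.mem_add _ _ _).mpr
      (Or.inl (H [] p pre' rfl x hx)))]
    rw [← pvChain_cons]
    exact ih fun pre₁ q pre₂ h => H (p :: pre₁) q pre₂ (by rw [h]; rfl)

-- main: A's redundant preorder and B's one-pass enumeration add the same first occurrences
theorem pvInner (c : List Char)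
    (IHmain : ∀ c', pvUpCount c' < pvUpCount c →
      ∀ st', pvChain st' (pvFseq c') = pvChain st' (pvGseq c' (pvUps c'))) :
    ∀ (todo done : List Nat) (st : List String), pvUps c = done ++ todo →
      (∀ pre₁ p pre₂, done = pre₁ ++ p :: pre₂ →
        ∀ x ∈ pvGseq (pvLowerAt c p) (pre₂ ++ todo), String.ofList x ∈ st) →
      pvChain st (todo.flatMap (fun j => pvFseq (pvLowerAt c j))) = pvChain st (pvAux c todo) := by
  intro todo
  induction todo with
  | nil => intro done st _ _; rfl
  | cons j ts ih =>
    intro done st hsplit H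
    have hj : j ∈ pvUps c := by rw [hsplit]; exact List.mem_append_right _ (List.mem_cons_self ..)
    obtain ⟨hjlt, hjup⟩ := mem_pvUps.mp hj
    have hdec : pvUpCount (pvLowerAt c j) < pvUpCount c := pvUpCount_lowerAt_lt c j hjlt hjup
    have hnd := pvUps_nodup c
    have hjnd : j ∉ done := by
      rw [hsplit] at hnd
      have := (List.nodup_append.mp hnd).2.2
      intro hmem
      exact this j hmem j (List.mem_cons_self ..) rfl
    have hupslow : pvUps (pvLowerAt c j) = done ++ ts := by
      rw [pvUps_lowerAt c j hj, hsplit, List.erase_append_right _ hjnd, List.erase_cons_head]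
    -- step 1: the j-branch of A = B's tail for j, after dropping covered prefixes
    have hstep1 : pvChain st (pvFseq (pvLowerAt c j)) = pvChain st (pvGseq (pvLowerAt c j) ts) := by
      rw [IHmain _ hdec, hupslow]
      apply pvDropPre
      intro pre₁ p pre₂ hpre x hx
      obtain ⟨S, hS, rfl⟩ := mem_pvGseq.mp hx
      obtain ⟨S₁, S₂, rfl, hS₁, hS₂⟩ := List.sublist_append_iff.mp hS
      have hx' : pvLowAll (S₁ ++ S₂) (pvLowerAt (pvLowerAt c j) p)
          = pvLowAll (S₁ ++ j :: S₂) (pvLowerAt c p) := by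
        rw [pvLowerAt_comm, ← pvLowAll_middle]
      rw [hx']
      refine H pre₁ p pre₂ hpre _ (mem_pvGseq.mpr ⟨S₁ ++ j :: S₂, ?_, rfl⟩)
      exact List.Sublist.append hS₁ (List.cons_sublist_cons.mpr hS₂)
    have hflat : (j :: ts).flatMap (fun k => pvFseq (pvLowerAt c k))
        = pvFseq (pvLowerAt c j) ++ ts.flatMap (fun k => pvFseq (pvLowerAt c k)) := by
      simp [List.flatMap_cons]
    rw [hflat, pvChain_append, hstep1]
    -- step 2: the remaining branches, with j's results now in the state
    have hrec := ih (done ++ [j]) (pvChain st (pvGseq (pvLowerAt c j) ts))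
      (by rw [hsplit, List.append_assoc]; rfl)
      (by
        intro pre₁ p pre₂ hpre x hx
        rcases List.eq_nil_or_concat pre₂ with rfl | ⟨pre₂', q, rfl⟩
        · obtain ⟨h1, h2⟩ := List.append_inj' hpre rfl
          obtain rfl := (List.cons.injEq ..).mp h2 |>.1
          exact mem_pvChain_of_mem _ hx
        · simp only [List.concat_eq_append] at hpre hx
          have hpre' : done ++ [j] = (pre₁ ++ p :: pre₂') ++ [q] := by
            rw [hpre]; simp
          obtain ⟨h1, h2⟩ := List.append_inj' hpre' rfl
          obtain rfl := (List.cons.injEq ..).mp h2 |>.1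
          have hmem : String.ofList x ∈ st := by
            refine H pre₁ p pre₂' h1 x ?_
            have heq : pre₂' ++ j :: ts = (pre₂' ++ [j]) ++ ts := by simp
            rw [heq]
            exact hx
          exact mem_pvChain_left _ hmem)
    rw [hrec]
    -- fold B's side back together
    have hauxstep : pvAux c (j :: ts) = pvGseq (pvLowerAt c j) ts ++ pvAux c ts := rfl
    rw [hauxstep, pvChain_append]

theorem pvMain : ∀ (c : List Char) (st : List String),
    pvChain st (pvFseq c) = pvChain st (pvGseq c (pvUps c)) := by
  suffices h : ∀ n c st, pvUpCount c = n →
      pvChain st (pvFseq c) = pvChain st (pvGseq c (pvUps c)) by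
    exact fun c st => h _ c st rfl
  intro n
  induction n using Nat.strong_induction_on with
  | _ n IH =>
    intro c st hn
    rw [pvFseq_eq, pvChain_cons]
    have := pvInner c (fun c' hlt st' => IH _ (hn ▸ hlt) c' st' rfl)
      (pvUps c) [] (PySem.Set.add st (String.ofList c)) rfl (by intro pre₁ p pre₂ h; cases pre₁ <;> simp at h)
    rw [this]
    rfl

-- ---- helper facts about the filtered position lists A's loop walks through ----

theorem pvFilter_ge_len (c : List Char) (i : Nat) (hge : c.length ≤ i) :
    (pvUps c).filter (fun j => decide (i ≤ j)) = [] := by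
  rw [List.filter_eq_nil_iff]
  intro j hj
  have := (mem_pvUps.mp hj).1
  simp only [decide_eq_true_eq]
  omega

theorem pvFilter_skip (c : List Char) (i : Nat) (hni : i ∉ pvUps c) :
    (pvUps c).filter (fun j => decide (i ≤ j)) = (pvUps c).filter (fun j => decide (i + 1 ≤ j)) := by
  apply List.filter_congr
  intro j hj
  have hij : j ≠ i := fun h => hni (h ▸ hj)
  simp only [decide_eq_decide]
  omega

theorem pvRangeFilter_split (p : Nat → Bool) (i N : Nat) (hiN : i < N) (hp : p i = true) :
    ((List.range N).filter p).filter (fun j => decide (i ≤ j))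
      = i :: ((List.range N).filter p).filter (fun j => decide (i + 1 ≤ j)) := by
  induction N with
  | zero => omega
  | succ n ihn =>
    simp only [List.range_succ, List.filter_append]
    by_cases hin : i < n
    · rw [ihn hin]
      have htail : ([n].filter p).filter (fun j => decide (i ≤ j))
          = ([n].filter p).filter (fun j => decide (i + 1 ≤ j)) := by
        apply List.filter_congr
        intro j hj
        have hjn : j = n := by
          have := (List.mem_filter.mp hj).1
          simpa using this
        subst hjn
        simp only [decide_eq_decide]
        omega
      rw [htail, List.cons_append]
    · have hieq : i = n := by omega
      subst hieq
      have h1 : ((List.range i).filter p).filter (fun j => decide (i ≤ j)) = [] := by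
        rw [List.filter_eq_nil_iff]
        intro j hj
        have := List.mem_range.mp (List.mem_filter.mp hj).1
        simp only [decide_eq_true_eq]
        omega
      have h2 : ((List.range i).filter p).filter (fun j => decide (i + 1 ≤ j)) = [] := by
        rw [List.filter_eq_nil_iff]
        intro j hj
        have := List.mem_range.mp (List.mem_filter.mp hj).1
        simp only [decide_eq_true_eq]
        omega
      have h3 : [i].filter p = [i] := by simp [hp]
      rw [h3, h1, h2]
      simp

theorem pvFilter_split (c : List Char) (i : Nat) (hi : i ∈ pvUps c) :
    (pvUps c).filter (fun j => decide (i ≤ j))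
      = i :: (pvUps c).filter (fun j => decide (i + 1 ≤ j)) := by
  obtain ⟨hlt, hup⟩ := mem_pvUps.mp hi
  exact pvRangeFilter_split _ i _ hlt hup

-- ---- port characterisations ----

theorem pvCore_eq (c : List Char) (i : Nat) (words : List String) :
    generate_all_variations_of_word_core c i words =
      pvChain words (((pvUps c).filter (fun j => decide (i ≤ j))).flatMap
        (fun j => pvFseq (pvLowerAt c j))) := by
  induction c, i, words using generate_all_variations_of_word_core.induct with
  | case1 c i words h hu nc r ihr ihr' ihnext =>
    rw [generate_all_variations_of_word_core]
    simp only [dif_pos h, dif_pos hu]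
    have hi : i ∈ pvUps c := mem_pvUps.mpr ⟨h, hu⟩
    rw [pvFilter_split c i hi]
    simp only [List.flatMap_cons, pvLowerAt]
    rw [pvChain_append]
    have hrnc : generate_all_variations_of_word_core
        (c.set i (PySem.Chars.lowerChar (c.getD i ' '))) 0
        (PySem.Set.add words (String.ofList (c.set i (PySem.Chars.lowerChar (c.getD i ' ')))))
        = pvChain words (pvFseq (c.set i (PySem.Chars.lowerChar (c.getD i ' ')))) := by
      rw [ihr']
      have h0 : (pvUps (c.set i (PySem.Chars.lowerChar (c.getD i ' ')))).filter
          (fun j => decide (0 ≤ j))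
          = pvUps (c.set i (PySem.Chars.lowerChar (c.getD i ' '))) := by
        rw [List.filter_eq_self]
        intro j _
        simp
      rw [h0, pvFseq_eq, pvChain_cons]
    have hupd : PySem.Set.update words
        (pvChain words (pvFseq (c.set i (PySem.Chars.lowerChar (c.getD i ' ')))))
        = pvChain words (pvFseq (c.set i (PySem.Chars.lowerChar (c.getD i ' ')))) := by
      rw [pvFseq_eq, pvChain_cons]
      exact pvUpdate_chain words _ _
    have ihnext' : generate_all_variations_of_word_core c (i + 1)
        (PySem.Set.update words (generate_all_variations_of_word_core
          (c.set i (PySem.Chars.lowerChar (c.getD i ' '))) 0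
          (PySem.Set.add words (String.ofList (c.set i (PySem.Chars.lowerChar (c.getD i ' '))))))) =
        pvChain (PySem.Set.update words (generate_all_variations_of_word_core
          (c.set i (PySem.Chars.lowerChar (c.getD i ' '))) 0
          (PySem.Set.add words (String.ofList (c.set i (PySem.Chars.lowerChar (c.getD i ' ')))))))
          (List.flatMap (fun j => pvFseq (c.set j (PySem.Chars.lowerChar (c.getD j ' '))))
            (List.filter (fun j => decide (i + 1 ≤ j)) (pvUps c))) := ihnext
    rw [hrnc, hupd] at ihnext'
    rw [hrnc, hupd]
    exact ihnext'
  | case2 c i words h hu ih =>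
    rw [generate_all_variations_of_word_core]
    simp only [dif_pos h, dif_neg hu]
    rw [ih, pvFilter_skip c i (fun hmem => hu (mem_pvUps.mp hmem).2)]
  | case3 c i words h =>
    rw [generate_all_variations_of_word_core]
    simp only [dif_neg h]
    rw [pvFilter_ge_len c i (by omega)]
    rfl

theorem pvGo_eq (rest : List Nat) (c : List Char) (w : List String) :
    generate_all_variations_of_word_go c rest w = pvChain w (pvAux c rest) := by
  induction rest generalizing c w with
  | nil => rfl
  | cons i rs ih =>
    show generate_all_variations_of_word_go c rs
        (generate_all_variations_of_word_go (pvLowerAt c i) rs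
          (PySem.Set.add w (String.ofList (pvLowerAt c i))))
      = pvChain w (pvAux c (i :: rs))
    rw [ih, ih]
    have : pvAux c (i :: rs) = (pvLowerAt c i :: pvAux (pvLowerAt c i) rs) ++ pvAux c rs := rfl
    rw [this, pvChain_append, pvChain_cons]

-- ===== VERDICT (by name: the statement is the Claim_ definition above) =====
theorem generate_all_variations_of_word_spec : Claim_equal_generate_all_variations_of_word := by
  intro word words _
  unfold Spec_generate_all_variations_of_word
  simp only [generate_all_variations_of_word, generate_all_variations_of_word_alt]
  rw [pvCore_eq, pvGo_eq]
  have hofList : String.ofList word.toList = word := String.ofList_toList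
  have h0 : (pvUps word.toList).filter (fun j => decide (0 ≤ j)) = pvUps word.toList := by
    rw [List.filter_eq_self]
    intro j _
    simp
  have hups : (List.range word.toList.length).filter
      (fun i => PySem.Chars.isupper (word.toList.getD i ' ')) = pvUps word.toList := rfl
  rw [h0, hups, hofList]
  have hadd : PySem.Set.add (PySem.Set.add words word) word = PySem.Set.add words word :=
    PySem.Set.add_of_mem ((PySem.Set.mem_add _ _ _).mpr (Or.inr rfl))
  rw [hadd]
  have hA : pvChain (PySem.Set.add words word)
      ((pvUps word.toList).flatMap (fun j => pvFseq (pvLowerAt word.toList j)))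
      = pvChain words (pvFseq word.toList) := by
    rw [pvFseq_eq, pvChain_cons, hofList]
  have hG : pvChain (PySem.Set.add words word) (pvAux word.toList (pvUps word.toList))
      = pvChain words (pvGseq word.toList (pvUps word.toList)) := by
    have hg : pvGseq word.toList (pvUps word.toList)
        = word.toList :: pvAux word.toList (pvUps word.toList) := rfl
    rw [hg, pvChain_cons, hofList]
  rw [hA, hG]
  exact pvMain word.toList words
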